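-- pv_equiv track=rewrite | github.com/alasong/method-thinker | src/extraction/methodology_extractor.py | _cluster_solutions
-- ===== SOURCE A (Python) =====
-- from typing import List, Dict, Optional
--
-- def _cluster_solutions(solutions: List[Dict]) -> List[List[Dict]]:
--     """聚类相似解答"""
--     # 简化实现：按问题类型聚类
--     clusters = {}
--
--     for solution in solutions:
--         problem_type = solution.get('problem_type', 'unknown')
--         if problem_type not in clusters:
--             clusters[problem_type] = []
--         clusters[problem_type].append(solution)
--
--     return list(clusters.values())
-- ===== SOURCE B (Python) =====
-- def _cluster_solutions(solutions):
--     types = []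
--     for s in solutions:
--         t = s.get('problem_type', 'unknown')
--         if t not in types:
--             types.append(t)
--     return [[s for s in solutions if s.get('problem_type', 'unknown') == t] for t in types]
-- ===== Notes on version B (the rewrite author's own statement) =====
-- stated objective: alternative
-- what changed: Replaces the single accumulating dict-of-lists pass with a first-appearance scan of the distinct problem_type keys followed by one filtering pass of the whole list per distinct type.
import Mathlib
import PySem

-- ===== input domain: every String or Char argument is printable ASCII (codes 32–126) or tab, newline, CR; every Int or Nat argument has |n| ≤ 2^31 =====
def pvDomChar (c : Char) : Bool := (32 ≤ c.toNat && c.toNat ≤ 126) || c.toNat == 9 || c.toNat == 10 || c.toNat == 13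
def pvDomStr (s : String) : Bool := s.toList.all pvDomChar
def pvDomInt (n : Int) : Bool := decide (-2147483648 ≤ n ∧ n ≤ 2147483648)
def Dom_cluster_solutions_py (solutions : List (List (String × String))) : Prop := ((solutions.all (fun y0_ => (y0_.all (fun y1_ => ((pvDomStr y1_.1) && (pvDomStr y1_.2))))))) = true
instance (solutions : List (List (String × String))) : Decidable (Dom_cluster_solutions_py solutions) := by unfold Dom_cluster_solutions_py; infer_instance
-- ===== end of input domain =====

-- ===== PORT A =====
-- solution.get('problem_type', 'unknown') on the assoc-list solution dict (shared by both ports)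
def pvKey (s : List (String × String)) : String :=
  (PySem.Dict.mk s).getD "problem_type" "unknown"

def cluster_solutions_py (solutions : List (List (String × String))) : List (List (List (String × String))) :=
  (solutions.foldl
    (fun clusters solution =>
      let problem_type := pvKey solution
      let clusters := if clusters.contains problem_type then clusters
                      else clusters.insert problem_type ([] : List (List (String × String)))
      clusters.modify problem_type [] (fun c => c ++ [solution]))
    (PySem.Dict.empty)).values

-- ===== PORT B =====
def cluster_solutions_py_alt (solutions : List (List (String × String))) : List (List (List (String × String))) :=
  let types := solutions.foldl
    (fun acc s => if pvKey s ∈ acc then acc else acc ++ [pvKey s]) []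
  types.map (fun t => solutions.filter (fun s => pvKey s == t))

-- ===== PRECONDITION & SPEC =====
def Spec_cluster_solutions_py (solutions : List (List (String × String))) (out : List (List (List (String × String)))) : Prop := out = cluster_solutions_py_alt solutions
instance (solutions : List (List (String × String))) (out : List (List (List (String × String)))) : Decidable (Spec_cluster_solutions_py solutions out) := by unfold Spec_cluster_solutions_py; infer_instance

-- ===== CLAIM (what is proved, stated in full; the proofs are below) =====
def Claim_equal_cluster_solutions_py : Prop := ∀ (solutions : List (List (String × String))), Dom_cluster_solutions_py solutions → Spec_cluster_solutions_py solutions (cluster_solutions_py solutions)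

-- ===== LEMMAS AND PROOFS =====

-- An insert of the default just before a modify at the same (absent) key is absorbed by the modify.
theorem pv_insert_modify {ν : Type} (d : PySem.Dict String ν) (k : String) (d0 : ν)
    (f : ν → ν) (h : d.contains k = false) :
    (d.insert k d0).modify k d0 f = d.modify k d0 f := by
  simp only [PySem.Dict.modify, PySem.Dict.insert_insert_self, PySem.Dict.getD_insert_self]
  congr 2
  simp [pysem, h]

-- A's loop step is a plain modify with default [].
theorem pv_stepA_eq (d : PySem.Dict String (List (List (String × String)))) (s : List (String × String)) :
    (let problem_type := pvKey s
     let d := if d.contains problem_type then d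
              else d.insert problem_type ([] : List (List (String × String)))
     d.modify problem_type [] (fun c => c ++ [s]))
    = d.modify (pvKey s) [] (fun c => c ++ [s]) := by
  by_cases h : d.contains (pvKey s)
  · simp [h]
  · simp only [Bool.not_eq_true] at h
    simp [h, pv_insert_modify d (pvKey s) _ _ h]

-- B's key-collection loop is PySem.Set.ofList of the mapped keys.
theorem pv_types_eq (solutions : List (List (String × String))) :
    solutions.foldl (fun acc s => if pvKey s ∈ acc then acc else acc ++ [pvKey s]) []
      = PySem.Set.ofList (solutions.map pvKey) := by
  simp only [PySem.Set.ofList, List.foldl_map]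
  congr 1; funext acc x; simp [PySem.Set.add]

-- ===== VERDICT (by name: the statement is the Claim_ definition above) =====
theorem cluster_solutions_py_spec : Claim_equal_cluster_solutions_py := by
  intro solutions _
  unfold Spec_cluster_solutions_py cluster_solutions_py cluster_solutions_py_alt
  rw [pv_types_eq]
  have hfold : solutions.foldl
      (fun clusters solution =>
        let problem_type := pvKey solution
        let clusters := if clusters.contains problem_type then clusters
                        else clusters.insert problem_type ([] : List (List (String × String)))
        clusters.modify problem_type [] (fun c => c ++ [solution]))
      PySem.Dict.empty
      = (solutions.map (fun s => (pvKey s, s))).foldl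
          (fun d p => d.modify p.1 [] (fun c => c ++ [p.2])) PySem.Dict.empty := by
    rw [List.foldl_map]
    congr 1; funext d s; exact pv_stepA_eq d s
  rw [hfold]
  set D := (solutions.map (fun s => (pvKey s, s))).foldl
      (fun d p => d.modify p.1 [] (fun c => c ++ [p.2])) PySem.Dict.empty with hD
  have hnd : D.keys.Nodup := by
    rw [hD, List.foldl_map]
    exact PySem.Dict.nodup_keys_foldl_modify_key solutions pvKey []
      (fun _ s => fun c => c ++ [s]) PySem.Dict.empty (by simp [pysem])
  have hkeys : D.keys = PySem.Set.ofList (solutions.map pvKey) := by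
    rw [hD, List.foldl_map,
      PySem.Dict.keys_foldl_modify_key]
    simp [pysem, PySem.Set.update, PySem.Set.ofList]
  have hget : ∀ t, D.getD t [] = solutions.filter (fun s => pvKey s == t) := by
    intro t
    rw [hD, PySem.Dict.getD_foldl_modify_append]
    simp [pysem, List.filter_map, Function.comp_def]
  rw [PySem.Dict.values_eq_map_keys D hnd [], hkeys]
  exact List.map_congr_left (fun t _ => hget t)
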